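-- pv_equiv track=rewrite | github.com/drabbit17/advent2020 | solutions/day17/solution.py | drop_unused_borders
-- ===== SOURCE A (Python) =====
-- def drop_unused_borders(space):
--     # clean north border
--     while len(set([elem for plane in space for elem in plane[0]])) == 1:
--         space = [[row for row in plane[1:]] for plane in space]
--     # clean south border
--     while len(set([elem for plane in space for elem in plane[-1]])) == 1:
--         space = [[row for row in plane[:-1]] for plane in space]
--     # clean east border
--     while len(set([row[-1] for plane in space for row in plane])) == 1:
--         space = [[row[:-1] for row in plane] for plane in space]
--     # clean west border
--     while len(set([row[0] for plane in space for row in plane])) == 1: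
--         space = [[row[1:] for row in plane] for plane in space]
--
--     return space
-- ===== SOURCE B (Python) =====
-- def drop_unused_borders(space):
--     # Count the uniform border layers on each side first, then slice each plane
--     # once, instead of rebuilding the whole grid for every stripped layer.
--     def uniform(xs):
--         return len(set(xs)) == 1
--
--     t = 0
--     while uniform([e for p in space for e in p[t]]):
--         t += 1
--     b = 0
--     while uniform([e for p in space for e in p[len(p) - 1 - b]]):
--         b += 1
--     planes = [p[t:len(p) - b] for p in space]
--     rows = [r for p in planes for r in p]
--     e = 0
--     while uniform([r[len(r) - 1 - e] for r in rows]):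
--         e += 1
--     w = 0
--     while uniform([r[w] for r in rows]):
--         w += 1
--     return [[r[w:len(r) - e] for r in p] for p in planes]
-- ===== Notes on version B (the rewrite author's own statement) =====
-- stated objective: alternative
-- what changed: Instead of A's four while-loops that rebuild the whole 3D grid once per stripped layer, B counts the consecutive uniform border layers on each side by inspecting only that layer, then slices each plane once.
import Mathlib
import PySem

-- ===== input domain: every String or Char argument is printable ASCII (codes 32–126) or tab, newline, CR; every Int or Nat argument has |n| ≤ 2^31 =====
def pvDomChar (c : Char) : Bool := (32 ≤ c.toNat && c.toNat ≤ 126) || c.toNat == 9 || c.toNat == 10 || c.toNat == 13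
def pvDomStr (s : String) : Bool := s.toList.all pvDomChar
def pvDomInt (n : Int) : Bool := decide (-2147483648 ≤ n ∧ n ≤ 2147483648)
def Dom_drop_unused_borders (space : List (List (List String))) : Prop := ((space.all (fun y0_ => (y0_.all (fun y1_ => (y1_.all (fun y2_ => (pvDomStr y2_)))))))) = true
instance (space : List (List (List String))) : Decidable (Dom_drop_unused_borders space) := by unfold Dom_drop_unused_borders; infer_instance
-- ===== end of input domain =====

-- B counts the uniform border layers on each side and slices each plane once, instead of A's
-- rebuild-the-grid-per-stripped-layer while loops; equivalence is proved on Pre_ (where A returns).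

-- shared helper: Python's 'len(set(xs)) == 1'
def pvSetLen1 (xs : List String) : Bool := (PySem.Set.ofList xs).length == 1

-- ===== PORT A =====
-- Each Python 'while' loop becomes one recursive function; the loop condition and the
-- rebuilt grid are named helpers (the Python comprehensions), cited by the termination proofs.
-- plane[0]/plane[-1]/row[-1]/row[0] raise on an empty plane/row in Python; headD/getLastD/
-- filterMap totalise them (exact inside Pre_, which keeps planes/rows nonempty while a loop runs).

def pvNorthCheck (space : List (List (List String))) : Bool :=
  pvSetLen1 (space.flatMap (fun p => p.headD []))          -- [elem for plane in space for elem in plane[0]]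
def pvNorthStep (space : List (List (List String))) : List (List (List String)) :=
  space.map (fun p => p.drop 1)                            -- [[row for row in plane[1:]] for plane in space]
def pvSouthCheck (space : List (List (List String))) : Bool :=
  pvSetLen1 (space.flatMap (fun p => p.getLastD []))       -- [elem for plane in space for elem in plane[-1]]
def pvSouthStep (space : List (List (List String))) : List (List (List String)) :=
  space.map (fun p => p.dropLast)                          -- [[row for row in plane[:-1]] for plane in space]
def pvEastCheck (space : List (List (List String))) : Bool :=
  pvSetLen1 (space.flatMap (fun p => p.filterMap List.getLast?))   -- [row[-1] for plane in space for row in plane]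
def pvEastStep (space : List (List (List String))) : List (List (List String)) :=
  space.map (fun p => p.map (fun r => r.dropLast))         -- [[row[:-1] for row in plane] for plane in space]
def pvWestCheck (space : List (List (List String))) : Bool :=
  pvSetLen1 (space.flatMap (fun p => p.filterMap List.head?))      -- [row[0] for plane in space for row in plane]
def pvWestStep (space : List (List (List String))) : List (List (List String)) :=
  space.map (fun p => p.map (fun r => r.drop 1))           -- [[row[1:] for row in plane] for plane in space]

-- facts cited by the ports' termination proofs (must precede the ports)
lemma pv_setlen1_ne_nil {xs : List String} (h : pvSetLen1 xs = true) : xs ≠ [] := by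
  intro e; subst e; simp [pvSetLen1, PySem.Set.ofList] at h

lemma pv_flatMap_ne_nil {α β : Type} {l : List α} {f : α → List β}
    (h : l.flatMap f ≠ []) : ∃ x ∈ l, f x ≠ [] := by
  by_contra hc
  push_neg at hc
  exact h (List.flatMap_eq_nil_iff.mpr hc)

lemma pv_filterMap_last_ne_nil {p : List (List String)}
    (h : p.filterMap List.getLast? ≠ []) : ∃ r ∈ p, r ≠ [] := by
  by_contra hc
  push_neg at hc
  exact h (List.filterMap_eq_nil_iff.mpr (fun r hr => by simp [hc r hr]))

lemma pv_filterMap_head_ne_nil {p : List (List String)}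
    (h : p.filterMap List.head? ≠ []) : ∃ r ∈ p, r ≠ [] := by
  by_contra hc
  push_neg at hc
  exact h (List.filterMap_eq_nil_iff.mpr (fun r hr => by simp [hc r hr]))

lemma pv_flatMap_filterMap {α : Type} (T : List (List (List String))) (f : List String → Option α) :
    T.flatMap (fun p => p.filterMap f) = (T.flatMap id).filterMap f := by
  induction T with
  | nil => rfl
  | cons p T ih => simp [List.flatMap_cons, List.filterMap_append, ih]

lemma pv_rowsOf_map (T : List (List (List String))) (f : List String → List String) :
    (T.map (fun p => p.map f)).flatMap id = (T.flatMap id).map f := by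
  induction T with
  | nil => rfl
  | cons p T ih => simp [List.flatMap_cons, ih]

lemma pv_north_dec (space : List (List (List String))) (h : pvNorthCheck space = true) :
    ((pvNorthStep space).map List.length).sum < (space.map List.length).sum := by
  unfold pvNorthCheck at h
  obtain ⟨p, hp, hne⟩ := pv_flatMap_ne_nil (pv_setlen1_ne_nil h)
  have hpne : p ≠ [] := by intro e; subst e; simp at hne
  have hlen : 0 < p.length := List.length_pos_iff.mpr hpne
  unfold pvNorthStep
  rw [List.map_map]
  refine List.sum_lt_sum _ _ (fun q _ => by simp) ⟨p, hp, ?_⟩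
  simp only [Function.comp_apply, List.length_drop]
  omega

lemma pv_south_dec (space : List (List (List String))) (h : pvSouthCheck space = true) :
    ((pvSouthStep space).map List.length).sum < (space.map List.length).sum := by
  unfold pvSouthCheck at h
  obtain ⟨p, hp, hne⟩ := pv_flatMap_ne_nil (pv_setlen1_ne_nil h)
  have hpne : p ≠ [] := by intro e; subst e; simp at hne
  have hlen : 0 < p.length := List.length_pos_iff.mpr hpne
  unfold pvSouthStep
  rw [List.map_map]
  refine List.sum_lt_sum _ _ (fun q _ => by simp) ⟨p, hp, ?_⟩
  simp only [Function.comp_apply, List.length_dropLast]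
  omega

lemma pv_east_dec (space : List (List (List String))) (h : pvEastCheck space = true) :
    (((pvEastStep space).flatMap id).map List.length).sum
      < ((space.flatMap id).map List.length).sum := by
  unfold pvEastCheck at h
  rw [pv_flatMap_filterMap] at h
  obtain ⟨r, hr, hrne⟩ := pv_filterMap_last_ne_nil (pv_setlen1_ne_nil h)
  have hlen : 0 < r.length := List.length_pos_iff.mpr hrne
  unfold pvEastStep
  rw [pv_rowsOf_map, List.map_map]
  refine List.sum_lt_sum _ _ (fun q _ => by simp) ⟨r, hr, ?_⟩
  simp only [Function.comp_apply, List.length_dropLast]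
  omega

lemma pv_west_dec (space : List (List (List String))) (h : pvWestCheck space = true) :
    (((pvWestStep space).flatMap id).map List.length).sum
      < ((space.flatMap id).map List.length).sum := by
  unfold pvWestCheck at h
  rw [pv_flatMap_filterMap] at h
  obtain ⟨r, hr, hrne⟩ := pv_filterMap_head_ne_nil (pv_setlen1_ne_nil h)
  have hlen : 0 < r.length := List.length_pos_iff.mpr hrne
  unfold pvWestStep
  rw [pv_rowsOf_map, List.map_map]
  refine List.sum_lt_sum _ _ (fun q _ => by simp) ⟨r, hr, ?_⟩
  simp only [Function.comp_apply, List.length_drop]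
  omega

def pvStripNorth (space : List (List (List String))) : List (List (List String)) :=
  if pvNorthCheck space then pvStripNorth (pvNorthStep space) else space
termination_by (space.map List.length).sum
decreasing_by exact pv_north_dec space (by assumption)

def pvStripSouth (space : List (List (List String))) : List (List (List String)) :=
  if pvSouthCheck space then pvStripSouth (pvSouthStep space) else space
termination_by (space.map List.length).sum
decreasing_by exact pv_south_dec space (by assumption)

def pvStripEast (space : List (List (List String))) : List (List (List String)) :=
  if pvEastCheck space then pvStripEast (pvEastStep space) else space
termination_by ((space.flatMap id).map List.length).sum
decreasing_by exact pv_east_dec space (by assumption)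

def pvStripWest (space : List (List (List String))) : List (List (List String)) :=
  if pvWestCheck space then pvStripWest (pvWestStep space) else space
termination_by ((space.flatMap id).map List.length).sum
decreasing_by exact pv_west_dec space (by assumption)

def drop_unused_borders (space : List (List (List String))) : List (List (List String)) :=
  pvStripWest (pvStripEast (pvStripSouth (pvStripNorth space)))

-- ===== PORT B =====  (Source B: count the uniform border layers per side, then slice once)
-- Source B's counting loops stop at the first non-uniform layer and raise (like A) when the
-- layers consume a whole dimension; the port totalises each counter by bounding it at the
-- minimum plane height / row width — the first index at which the Python would raise —
-- which is exact inside Pre_.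

-- number of leading i < n with f i (the counter a 'while f(i): i += 1' loop reaches)
def pvCnt (n : Nat) (f : Nat → Bool) : Nat := ((List.range n).takeWhile f).length

-- min(len(xs) for xs in xss) with default 0
def pvMinLen {α : Type} : List (List α) → Nat
  | [] => 0
  | [xs] => xs.length
  | xs :: rest => min xs.length (pvMinLen rest)

-- [e for p in space for e in p[i]]  (p[i] is in range whenever i < pvMinLen space)
def pvTop (space : List (List (List String))) (i : Nat) : List String :=
  space.flatMap (fun p => p.getD i [])

-- [e for p in space for e in p[len(p)-1-j]]
def pvBot (space : List (List (List String))) (j : Nat) : List String :=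
  space.flatMap (fun p => p.getD (p.length - 1 - j) [])

def pvCountTop (space : List (List (List String))) : Nat :=
  pvCnt (pvMinLen space) (fun i => pvSetLen1 (pvTop space i))

def pvCountBot (space : List (List (List String))) (t : Nat) : Nat :=
  pvCnt (pvMinLen space - t) (fun j => pvSetLen1 (pvBot space j))

-- [p[t:len(p)-b] for p in space]
def pvTrimmed (space : List (List (List String))) : List (List (List String)) :=
  space.map (fun p =>
    (p.take (p.length - pvCountBot space (pvCountTop space))).drop (pvCountTop space))

-- [r for p in planes for r in p]
def pvRows (space : List (List (List String))) : List (List String) :=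
  (pvTrimmed space).flatMap id

-- [r[len(r)-1-k] for r in rows]
def pvColLast (rows : List (List String)) (k : Nat) : List String :=
  rows.map (fun r => r.getD (r.length - 1 - k) "")

-- [r[k] for r in rows]
def pvColFirst (rows : List (List String)) (k : Nat) : List String :=
  rows.map (fun r => r.getD k "")

def pvCountEast (rows : List (List String)) : Nat :=
  pvCnt (pvMinLen rows) (fun k => pvSetLen1 (pvColLast rows k))

def pvCountWest (rows : List (List String)) (e : Nat) : Nat :=
  pvCnt (pvMinLen rows - e) (fun k => pvSetLen1 (pvColFirst rows k))

def drop_unused_borders_alt (space : List (List (List String))) : List (List (List String)) :=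
  let rows := pvRows space
  let e := pvCountEast rows
  let w := pvCountWest rows e
  (pvTrimmed space).map (fun p => p.map (fun r => (r.take (r.length - e)).drop w))

-- ===== PRECONDITION & SPEC =====
-- Pre_ excludes exactly the inputs on which A raises IndexError: a nonempty grid whose
-- uniform border layers consume a whole dimension (a loop then indexes an empty plane/row).
def Pre_drop_unused_borders (space : List (List (List String))) : Prop :=
  space = [] ∨
    (pvCountTop space + pvCountBot space (pvCountTop space) < pvMinLen space ∧
     pvCountEast (pvRows space) + pvCountWest (pvRows space) (pvCountEast (pvRows space))
       < pvMinLen (pvRows space))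

instance (space : List (List (List String))) : Decidable (Pre_drop_unused_borders space) := by
  unfold Pre_drop_unused_borders; infer_instance

def pvWitness_drop_unused_borders : List (List (List String)) := [[["a", "b"], ["b", "a"]]]

def Spec_drop_unused_borders (space : List (List (List String))) (out : List (List (List String))) : Prop := out = drop_unused_borders_alt space
instance (space : List (List (List String))) (out : List (List (List String))) : Decidable (Spec_drop_unused_borders space out) := by unfold Spec_drop_unused_borders; infer_instance

-- ===== CLAIM (what is proved, stated in full; the proofs are below) =====
def Claim_equal_drop_unused_borders : Prop := ∀ (space : List (List (List String))), Dom_drop_unused_borders space → Pre_drop_unused_borders space → Spec_drop_unused_borders space (drop_unused_borders space)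

-- ===== LEMMAS AND PROOFS =====

-- counter lemmas
lemma pvCnt_congr {n : Nat} {f g : Nat → Bool} (h : ∀ i < n, f i = g i) :
    pvCnt n f = pvCnt n g := by
  unfold pvCnt
  have key : ∀ (l : List Nat), (∀ i ∈ l, f i = g i) → l.takeWhile f = l.takeWhile g := by
    intro l
    induction l with
    | nil => intro _; rfl
    | cons a l ih =>
      intro hl
      simp only [List.takeWhile_cons, hl a (by simp)]
      cases g a <;> simp [ih (fun i hi => hl i (by simp [hi]))]
  rw [key _ (fun i hi => h i (List.mem_range.mp hi))]

lemma pvCnt_succ_pos {n : Nat} {f : Nat → Bool} (h : f 0 = true) :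
    pvCnt (n + 1) f = pvCnt n (fun i => f (i + 1)) + 1 := by
  unfold pvCnt
  rw [List.range_succ_eq_map, List.takeWhile_cons_of_pos (by simpa using h),
    List.takeWhile_map]
  simp only [List.length_cons, List.length_map]
  rfl

lemma pvCnt_zero_neg {n : Nat} {f : Nat → Bool} (h : f 0 = false) : pvCnt n f = 0 := by
  cases n with
  | zero => rfl
  | succ n =>
    unfold pvCnt
    rw [List.range_succ_eq_map, List.takeWhile_cons_of_neg (by simp [h])]
    rfl

lemma pvCnt_head_false {n : Nat} {f : Nat → Bool} (h : pvCnt n f = 0) (hn : 0 < n) :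
    f 0 = false := by
  by_contra hc
  have hc' : f 0 = true := by revert hc; cases f 0 <;> simp
  cases n with
  | zero => omega
  | succ m => rw [pvCnt_succ_pos hc'] at h; omega

lemma pvCnt_head_true {n : Nat} {f : Nat → Bool} (h : 0 < pvCnt n f) : f 0 = true := by
  by_contra hc
  have hc' : f 0 = false := by revert hc; cases f 0 <;> simp
  rw [pvCnt_zero_neg hc'] at h
  omega

-- pvMinLen lemmas
lemma pvMinLen_le {α : Type} {xss : List (List α)} {xs : List α} (h : xs ∈ xss) :
    pvMinLen xss ≤ xs.length := by
  induction xss with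
  | nil => simp at h
  | cons y ys ih =>
    cases ys with
    | nil => simp at h; subst h; simp [pvMinLen]
    | cons z zs =>
      rcases List.mem_cons.mp h with h | h
      · subst h; simp [pvMinLen]
      · exact le_trans (by simp [pvMinLen]) (ih h)

lemma pvMinLen_map_sub {α β : Type} {xss : List (List α)} {g : List α → List β} {k : Nat}
    (h : ∀ xs ∈ xss, (g xs).length = xs.length - k) :
    pvMinLen (xss.map g) = pvMinLen xss - k := by
  induction xss with
  | nil => simp [pvMinLen]
  | cons y ys ih =>
    cases ys with
    | nil => simp [pvMinLen, h y (by simp)]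
    | cons z zs =>
      have htail := ih (fun xs hxs => h xs (List.mem_cons_of_mem _ hxs))
      simp only [List.map_cons, pvMinLen] at htail ⊢
      rw [htail, h y (by simp)]
      omega

-- getD bridges
lemma pv_headD_getD (p : List (List String)) : p.headD [] = p.getD 0 [] := by
  cases p <;> rfl

lemma pv_getLastD_getD (p : List (List String)) : p.getLastD [] = p.getD (p.length - 1) [] := by
  cases p with
  | nil => rfl
  | cons a l =>
    rw [List.getLastD_eq_getLast?, List.getLast?_eq_getElem?, List.getD_eq_getElem?_getD]

lemma pv_getD_drop {α : Type} (p : List α) (m i : Nat) (d : α) :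
    (p.drop m).getD i d = p.getD (m + i) d := by
  simp [List.getD_eq_getElem?_getD, List.getElem?_drop]

lemma pv_getD_take {α : Type} (p : List α) {n i : Nat} (d : α) (h : i < n) :
    (p.take n).getD i d = p.getD i d := by
  simp [List.getD_eq_getElem?_getD, h]

lemma pv_getD_dropLast {α : Type} (p : List α) {i : Nat} (d : α) (h : i < p.length - 1) :
    p.dropLast.getD i d = p.getD i d := by
  rw [List.dropLast_eq_take]
  exact pv_getD_take p d h

-- congruence helper
lemma pv_flatMap_congr {α β : Type} {l : List α} {f g : α → List β}
    (h : ∀ x ∈ l, f x = g x) : l.flatMap f = l.flatMap g := by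
  induction l with
  | nil => rfl
  | cons a l ih => simp [List.flatMap_cons, h a (by simp), ih (fun x hx => h x (by simp [hx]))]

-- check/layer identities
lemma pv_north_check_eq (space : List (List (List String))) :
    pvNorthCheck space = pvSetLen1 (pvTop space 0) := by
  unfold pvNorthCheck pvTop
  rw [pv_flatMap_congr (fun p _ => pv_headD_getD p)]

lemma pv_south_check_eq (space : List (List (List String))) :
    pvSouthCheck space = pvSetLen1 (pvBot space 0) := by
  unfold pvSouthCheck pvBot
  congr 1
  refine pv_flatMap_congr (fun p _ => ?_)
  rw [pv_getLastD_getD]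
  simp

lemma pv_filterMap_last_eq_colLast {rows : List (List String)}
    (h : ∀ r ∈ rows, r ≠ []) :
    rows.filterMap List.getLast? = pvColLast rows 0 := by
  unfold pvColLast
  induction rows with
  | nil => rfl
  | cons r rows ih =>
    have hr : r ≠ [] := h r (by simp)
    have hlt : r.length - 1 - 0 < r.length := by
      have := List.length_pos_iff.mpr hr; omega
    have h1 : r.getLast? = some (r.getD (r.length - 1 - 0) "") := by
      rw [List.getLast?_eq_getElem?, List.getD_eq_getElem?_getD,
        List.getElem?_eq_getElem hlt]
      simp
    rw [List.filterMap_cons, h1, List.map_cons, ih (fun s hs => h s (by simp [hs]))]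

lemma pv_east_check_eq {T : List (List (List String))}
    (h : ∀ r ∈ T.flatMap id, r ≠ []) :
    pvEastCheck T = pvSetLen1 (pvColLast (T.flatMap id) 0) := by
  unfold pvEastCheck
  rw [pv_flatMap_filterMap, pv_filterMap_last_eq_colLast h]

lemma pv_filterMap_head_eq_colFirst {rows : List (List String)}
    (h : ∀ r ∈ rows, r ≠ []) :
    rows.filterMap List.head? = pvColFirst rows 0 := by
  unfold pvColFirst
  induction rows with
  | nil => rfl
  | cons r rows ih =>
    have hr : r ≠ [] := h r (by simp)
    rw [List.filterMap_cons, List.map_cons, ih (fun s hs => h s (by simp [hs]))]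
    cases r with
    | nil => exact absurd rfl hr
    | cons a l => simp

lemma pv_west_check_eq {T : List (List (List String))}
    (h : ∀ r ∈ T.flatMap id, r ≠ []) :
    pvWestCheck T = pvSetLen1 (pvColFirst (T.flatMap id) 0) := by
  unfold pvWestCheck
  rw [pv_flatMap_filterMap, pv_filterMap_head_eq_colFirst h]

-- layer shifts
lemma pv_top_shift (space : List (List (List String))) (i : Nat) :
    pvTop (pvNorthStep space) i = pvTop space (i + 1) := by
  unfold pvTop pvNorthStep
  rw [List.flatMap_map]
  refine pv_flatMap_congr (fun p _ => ?_)
  show (p.drop 1).getD i [] = p.getD (i + 1) []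
  rw [pv_getD_drop]
  congr 1
  omega

lemma pv_bot_shift {space : List (List (List String))} {j : Nat}
    (h : ∀ p ∈ space, j + 2 ≤ p.length) :
    pvBot (pvSouthStep space) j = pvBot space (j + 1) := by
  unfold pvBot pvSouthStep
  rw [List.flatMap_map]
  refine pv_flatMap_congr (fun p hp => ?_)
  show p.dropLast.getD (p.dropLast.length - 1 - j) [] = p.getD (p.length - 1 - (j + 1)) []
  have hp2 := h p hp
  rw [List.length_dropLast, pv_getD_dropLast p [] (by omega)]
  congr 1
  omega

lemma pv_bot_dropTop {space : List (List (List String))} {t j : Nat}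
    (h : ∀ p ∈ space, t + j + 1 ≤ p.length) :
    pvBot (space.map (fun p => p.drop t)) j = pvBot space j := by
  unfold pvBot
  rw [List.flatMap_map]
  refine pv_flatMap_congr (fun p hp => ?_)
  show (p.drop t).getD ((p.drop t).length - 1 - j) [] = p.getD (p.length - 1 - j) []
  have hp2 := h p hp
  rw [List.length_drop, pv_getD_drop]
  congr 1
  omega

lemma pv_colLast_shift {rows : List (List String)} {k : Nat}
    (h : ∀ r ∈ rows, k + 2 ≤ r.length) :
    pvColLast (rows.map (fun r => r.dropLast)) k = pvColLast rows (k + 1) := by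
  unfold pvColLast
  rw [List.map_map]
  refine List.map_congr_left (fun r hr => ?_)
  show r.dropLast.getD (r.dropLast.length - 1 - k) "" = r.getD (r.length - 1 - (k + 1)) ""
  have hr2 := h r hr
  rw [List.length_dropLast, pv_getD_dropLast r "" (by omega)]
  congr 1
  omega

lemma pv_colFirst_shift (rows : List (List String)) (k : Nat) :
    pvColFirst (rows.map (fun r => r.drop 1)) k = pvColFirst rows (k + 1) := by
  unfold pvColFirst
  rw [List.map_map]
  refine List.map_congr_left (fun r _ => ?_)
  show (r.drop 1).getD k "" = r.getD (k + 1) ""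
  rw [pv_getD_drop]
  congr 1
  omega

lemma pv_colFirst_take {rows : List (List String)} {e k : Nat}
    (h : ∀ r ∈ rows, k + e < r.length) :
    pvColFirst (rows.map (fun r => r.take (r.length - e))) k = pvColFirst rows k := by
  unfold pvColFirst
  rw [List.map_map]
  refine List.map_congr_left (fun r hr => ?_)
  exact pv_getD_take r "" (by have := h r hr; omega)

-- ===== main per-phase lemmas =====

lemma pv_north_main : ∀ (n : Nat) (space : List (List (List String))),
    pvCountTop space = n → (space = [] ∨ n < pvMinLen space) →
    pvStripNorth space = space.map (fun p => p.drop n) := by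
  intro n
  induction n with
  | zero =>
    intro space h1 h2
    have hrhs : space.map (fun p => p.drop 0) = space := by simp
    rw [hrhs]
    rcases h2 with h2 | h2
    · subst h2
      rw [pvStripNorth]
      have : pvNorthCheck [] = false := by decide
      simp [this]
    · unfold pvCountTop at h1
      have hf := pvCnt_head_false h1 h2
      simp only at hf
      rw [pvStripNorth, pv_north_check_eq, hf]
      simp
  | succ n ih =>
    intro space h1 h2
    have hne : space ≠ [] := by
      rintro rfl
      simp [pvCountTop, pvMinLen, pvCnt] at h1
    have hH : n + 1 < pvMinLen space := by
      rcases h2 with h2 | h2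
      · exact absurd h2 hne
      · exact h2
    unfold pvCountTop at h1
    have hf0 : pvSetLen1 (pvTop space 0) = true := by
      have := pvCnt_head_true (n := pvMinLen space)
        (f := fun i => pvSetLen1 (pvTop space i)) (by omega)
      simpa using this
    have hlen' : pvMinLen (pvNorthStep space) = pvMinLen space - 1 := by
      unfold pvNorthStep
      exact pvMinLen_map_sub (fun xs _ => by simp)
    have hcnt' : pvCountTop (pvNorthStep space) = n := by
      unfold pvCountTop
      rw [hlen']
      have hs : pvMinLen space = (pvMinLen space - 1) + 1 := by omega
      rw [hs, pvCnt_succ_pos (by simpa using hf0)] at h1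
      rw [pvCnt_congr (fun i _ => by rw [pv_top_shift])]
      omega
    have hpre' : n < pvMinLen (pvNorthStep space) := by omega
    have ihres := ih (pvNorthStep space) hcnt' (Or.inr hpre')
    rw [pvStripNorth, pv_north_check_eq, hf0, if_pos rfl, ihres]
    unfold pvNorthStep
    rw [List.map_map]
    refine List.map_congr_left (fun p _ => ?_)
    show (p.drop 1).drop n = p.drop (n + 1)
    rw [List.drop_drop]
    congr 1
    omega

lemma pv_south_main : ∀ (n : Nat) (space : List (List (List String))),
    pvCountBot space 0 = n → (space = [] ∨ n < pvMinLen space) →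
    pvStripSouth space = space.map (fun p => p.take (p.length - n)) := by
  intro n
  induction n with
  | zero =>
    intro space h1 h2
    have hrhs : space.map (fun p => p.take (p.length - 0)) = space := by simp
    rw [hrhs]
    rcases h2 with h2 | h2
    · subst h2
      rw [pvStripSouth]
      have : pvSouthCheck [] = false := by decide
      simp [this]
    · unfold pvCountBot at h1
      simp only [Nat.sub_zero] at h1
      have hf := pvCnt_head_false h1 h2
      simp only at hf
      rw [pvStripSouth, pv_south_check_eq, hf]
      simp
  | succ n ih =>
    intro space h1 h2
    have hne : space ≠ [] := by
      rintro rfl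
      simp [pvCountBot, pvMinLen, pvCnt] at h1
    have hH : n + 1 < pvMinLen space := by
      rcases h2 with h2 | h2
      · exact absurd h2 hne
      · exact h2
    unfold pvCountBot at h1
    simp only [Nat.sub_zero] at h1
    have hf0 : pvSetLen1 (pvBot space 0) = true := by
      have := pvCnt_head_true (n := pvMinLen space)
        (f := fun j => pvSetLen1 (pvBot space j)) (by omega)
      simpa using this
    have hlen' : pvMinLen (pvSouthStep space) = pvMinLen space - 1 := by
      unfold pvSouthStep
      exact pvMinLen_map_sub (fun xs _ => by simp)
    have hcnt' : pvCountBot (pvSouthStep space) 0 = n := by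
      unfold pvCountBot
      simp only [Nat.sub_zero]
      rw [hlen']
      have hs : pvMinLen space = (pvMinLen space - 1) + 1 := by omega
      rw [hs, pvCnt_succ_pos (by simpa using hf0)] at h1
      rw [pvCnt_congr (fun j hj => by
        rw [pv_bot_shift (fun p hp => by
          have := pvMinLen_le hp
          omega)])]
      omega
    have hpre' : n < pvMinLen (pvSouthStep space) := by omega
    have ihres := ih (pvSouthStep space) hcnt' (Or.inr hpre')
    rw [pvStripSouth, pv_south_check_eq, hf0, if_pos rfl, ihres]
    unfold pvSouthStep
    rw [List.map_map]
    refine List.map_congr_left (fun p _ => ?_)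
    show p.dropLast.take (p.dropLast.length - n) = p.take (p.length - (n + 1))
    rw [List.length_dropLast, List.dropLast_eq_take, List.take_take]
    congr 1
    omega

lemma pv_east_main : ∀ (n : Nat) (T : List (List (List String))),
    pvCountEast (T.flatMap id) = n → (T.flatMap id = [] ∨ n < pvMinLen (T.flatMap id)) →
    pvStripEast T = T.map (fun p => p.map (fun r => r.take (r.length - n))) := by
  intro n
  induction n with
  | zero =>
    intro T h1 h2
    have hrhs : T.map (fun p => p.map (fun r => r.take (r.length - 0))) = T := by simp
    rw [hrhs]
    rcases h2 with h2 | h2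
    · rw [pvStripEast]
      have : pvEastCheck T = false := by
        unfold pvEastCheck
        rw [pv_flatMap_filterMap, h2]
        decide
      simp [this]
    · have hnn : ∀ r ∈ T.flatMap id, r ≠ [] := by
        intro r hr e
        have := pvMinLen_le hr
        subst e
        simp only [List.length_nil, Nat.le_zero] at this
        omega
      unfold pvCountEast at h1
      have hf := pvCnt_head_false h1 h2
      simp only at hf
      rw [pvStripEast, pv_east_check_eq hnn, hf]
      simp
  | succ n ih =>
    intro T h1 h2
    have hrne : T.flatMap id ≠ [] := by
      intro e
      rw [e] at h1
      simp [pvCountEast, pvMinLen, pvCnt] at h1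
    have hW : n + 1 < pvMinLen (T.flatMap id) := by
      rcases h2 with h2 | h2
      · exact absurd h2 hrne
      · exact h2
    have hnn : ∀ r ∈ T.flatMap id, r ≠ [] := by
      intro r hr e
      have := pvMinLen_le hr
      subst e
      simp only [List.length_nil, Nat.le_zero] at this
      omega
    unfold pvCountEast at h1
    have hf0 : pvSetLen1 (pvColLast (T.flatMap id) 0) = true := by
      have := pvCnt_head_true (n := pvMinLen (T.flatMap id))
        (f := fun k => pvSetLen1 (pvColLast (T.flatMap id) k)) (by omega)
      simpa using this
    have hrows : (pvEastStep T).flatMap id = (T.flatMap id).map (fun r => r.dropLast) := by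
      unfold pvEastStep
      exact pv_rowsOf_map T _
    have hlen' : pvMinLen ((pvEastStep T).flatMap id) = pvMinLen (T.flatMap id) - 1 := by
      rw [hrows]
      exact pvMinLen_map_sub (fun xs _ => by simp)
    have hcnt' : pvCountEast ((pvEastStep T).flatMap id) = n := by
      unfold pvCountEast
      rw [hlen']
      have hs : pvMinLen (T.flatMap id) = (pvMinLen (T.flatMap id) - 1) + 1 := by omega
      rw [hs, pvCnt_succ_pos (by simpa using hf0)] at h1
      rw [pvCnt_congr (fun k hk => by
        rw [hrows, pv_colLast_shift (fun r hr => by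
          have := pvMinLen_le hr
          omega)])]
      exact Nat.succ_injective h1
    have hpre' : n < pvMinLen ((pvEastStep T).flatMap id) := by omega
    have ihres := ih (pvEastStep T) hcnt' (Or.inr hpre')
    rw [pvStripEast, pv_east_check_eq hnn, hf0, if_pos rfl, ihres]
    unfold pvEastStep
    rw [List.map_map]
    refine List.map_congr_left (fun p _ => ?_)
    simp only [Function.comp_apply, List.map_map]
    refine List.map_congr_left (fun r _ => ?_)
    show r.dropLast.take (r.dropLast.length - n) = r.take (r.length - (n + 1))
    rw [List.length_dropLast, List.dropLast_eq_take, List.take_take]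
    congr 1
    omega

lemma pv_west_main : ∀ (n : Nat) (T : List (List (List String))),
    pvCountWest (T.flatMap id) 0 = n → (T.flatMap id = [] ∨ n < pvMinLen (T.flatMap id)) →
    pvStripWest T = T.map (fun p => p.map (fun r => r.drop n)) := by
  intro n
  induction n with
  | zero =>
    intro T h1 h2
    have hrhs : T.map (fun p => p.map (fun r => r.drop 0)) = T := by simp
    rw [hrhs]
    rcases h2 with h2 | h2
    · rw [pvStripWest]
      have : pvWestCheck T = false := by
        unfold pvWestCheck
        rw [pv_flatMap_filterMap, h2]
        decide
      simp [this]
    · have hnn : ∀ r ∈ T.flatMap id, r ≠ [] := by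
        intro r hr e
        have := pvMinLen_le hr
        subst e
        simp only [List.length_nil, Nat.le_zero] at this
        omega
      unfold pvCountWest at h1
      simp only [Nat.sub_zero] at h1
      have hf := pvCnt_head_false h1 h2
      simp only at hf
      rw [pvStripWest, pv_west_check_eq hnn, hf]
      simp
  | succ n ih =>
    intro T h1 h2
    have hrne : T.flatMap id ≠ [] := by
      intro e
      rw [e] at h1
      simp [pvCountWest, pvMinLen, pvCnt] at h1
    have hW : n + 1 < pvMinLen (T.flatMap id) := by
      rcases h2 with h2 | h2
      · exact absurd h2 hrne
      · exact h2
    have hnn : ∀ r ∈ T.flatMap id, r ≠ [] := by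
      intro r hr e
      have := pvMinLen_le hr
      subst e
      simp only [List.length_nil, Nat.le_zero] at this
      omega
    unfold pvCountWest at h1
    simp only [Nat.sub_zero] at h1
    have hf0 : pvSetLen1 (pvColFirst (T.flatMap id) 0) = true := by
      have := pvCnt_head_true (n := pvMinLen (T.flatMap id))
        (f := fun k => pvSetLen1 (pvColFirst (T.flatMap id) k)) (by omega)
      simpa using this
    have hrows : (pvWestStep T).flatMap id = (T.flatMap id).map (fun r => r.drop 1) := by
      unfold pvWestStep
      exact pv_rowsOf_map T _
    have hlen' : pvMinLen ((pvWestStep T).flatMap id) = pvMinLen (T.flatMap id) - 1 := by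
      rw [hrows]
      exact pvMinLen_map_sub (fun xs _ => by simp)
    have hcnt' : pvCountWest ((pvWestStep T).flatMap id) 0 = n := by
      unfold pvCountWest
      simp only [Nat.sub_zero]
      rw [hlen']
      have hs : pvMinLen (T.flatMap id) = (pvMinLen (T.flatMap id) - 1) + 1 := by omega
      rw [hs, pvCnt_succ_pos (by simpa using hf0)] at h1
      rw [pvCnt_congr (fun k hk => by rw [hrows, pv_colFirst_shift])]
      exact Nat.succ_injective h1
    have hpre' : n < pvMinLen ((pvWestStep T).flatMap id) := by omega
    have ihres := ih (pvWestStep T) hcnt' (Or.inr hpre')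
    rw [pvStripWest, pv_west_check_eq hnn, hf0, if_pos rfl, ihres]
    unfold pvWestStep
    rw [List.map_map]
    refine List.map_congr_left (fun p _ => ?_)
    simp only [Function.comp_apply, List.map_map]
    refine List.map_congr_left (fun r _ => ?_)
    show (r.drop 1).drop n = r.drop (n + 1)
    rw [List.drop_drop]
    congr 1
    omega

-- ===== VERDICT =====
theorem drop_unused_borders_spec : Claim_equal_drop_unused_borders := by
  intro space _ hpre
  unfold Spec_drop_unused_borders
  rcases hpre with hnil | ⟨C1, C2⟩
  · subst hnil
    have e1 := pv_north_main 0 [] rfl (Or.inl rfl)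
    have e2 := pv_south_main 0 [] rfl (Or.inl rfl)
    have e3 := pv_east_main 0 [] rfl (Or.inl rfl)
    have e4 := pv_west_main 0 [] rfl (Or.inl rfl)
    simp only [List.map_nil] at e1 e2 e3 e4
    unfold drop_unused_borders
    rw [e1, e2, e3, e4]
    rfl
  · have hne : space ≠ [] := by
      rintro rfl
      simp [pvCountTop, pvCountBot, pvMinLen, pvCnt] at C1
    have ht : pvCountTop space < pvMinLen space := by omega
    have A1 := pv_north_main (pvCountTop space) space rfl (Or.inr ht)
    have hminS1 : pvMinLen (space.map (fun p => p.drop (pvCountTop space)))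
        = pvMinLen space - pvCountTop space :=
      pvMinLen_map_sub (fun xs _ => by simp)
    have hbot : pvCountBot (space.map (fun p => p.drop (pvCountTop space))) 0
        = pvCountBot space (pvCountTop space) := by
      unfold pvCountBot
      simp only [Nat.sub_zero]
      rw [hminS1]
      exact pvCnt_congr (fun j hj => by
        rw [pv_bot_dropTop (fun p hp => by
          have := pvMinLen_le hp
          omega)])
    have A2 := pv_south_main (pvCountBot space (pvCountTop space))
      (space.map (fun p => p.drop (pvCountTop space))) hbot
      (Or.inr (by rw [hminS1]; omega))
    have hTrim : (space.map (fun p => p.drop (pvCountTop space))).map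
        (fun p => p.take (p.length - pvCountBot space (pvCountTop space))) = pvTrimmed space := by
      unfold pvTrimmed
      rw [List.map_map]
      refine List.map_congr_left (fun p hp => ?_)
      have hlp := pvMinLen_le hp
      simp only [Function.comp_apply, List.length_drop]
      rw [List.drop_take]
      congr 1
      omega
    have hrowsT : (pvTrimmed space).flatMap id = pvRows space := rfl
    have A3 := pv_east_main (pvCountEast (pvRows space)) (pvTrimmed space)
      (by rw [hrowsT]) (Or.inr (by rw [hrowsT]; omega))
    have hrows2 : ((pvTrimmed space).map
          (fun p => p.map (fun r => r.take (r.length - pvCountEast (pvRows space))))).flatMap id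
        = (pvRows space).map (fun r => r.take (r.length - pvCountEast (pvRows space))) := by
      rw [pv_rowsOf_map, hrowsT]
    have hminW2 : pvMinLen (((pvTrimmed space).map
          (fun p => p.map (fun r => r.take (r.length - pvCountEast (pvRows space))))).flatMap id)
        = pvMinLen (pvRows space) - pvCountEast (pvRows space) := by
      rw [hrows2]
      exact pvMinLen_map_sub (fun xs _ => by rw [List.length_take]; omega)
    have hwest : pvCountWest (((pvTrimmed space).map
          (fun p => p.map (fun r => r.take (r.length - pvCountEast (pvRows space))))).flatMap id) 0
        = pvCountWest (pvRows space) (pvCountEast (pvRows space)) := by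
      unfold pvCountWest
      simp only [Nat.sub_zero]
      rw [hminW2]
      exact pvCnt_congr (fun k hk => by
        rw [hrows2, pv_colFirst_take (fun r hr => by
          have := pvMinLen_le hr
          omega)])
    have A4 := pv_west_main (pvCountWest (pvRows space) (pvCountEast (pvRows space)))
      ((pvTrimmed space).map
        (fun p => p.map (fun r => r.take (r.length - pvCountEast (pvRows space)))))
      hwest (Or.inr (by rw [hminW2]; omega))
    unfold drop_unused_borders
    rw [A1, A2, hTrim, A3, A4]
    unfold drop_unused_borders_alt
    rw [List.map_map]
    refine List.map_congr_left (fun p _ => ?_)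
    simp only [Function.comp_apply, List.map_map]
    rfl
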